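-- pv_equiv track=rewrite | github.com/neogeek23/Tic-Tac-Toe | tictactoe.py | __is_path_continuous
-- ===== SOURCE A (Python) =====
-- def __is_path_continuous(path, freedoms):
-- 	# This will prune out impossible paths (paths that wrap around the space)
-- 	# Though this could be static, it doesn't make sense as static, so I haven't made it so.
-- 	slope_is_legit = True
-- 	# We want to look at each element in a list against every other element in that list, except itself so it is a
-- 	# for i for j where i != j kind of thing - this is more detail that necessary in a comment, the so it is a part
-- 	for i in range(len(path)):
-- 		found_a_slope_buddy = False
-- 		for j in range(len(path)):
-- 			if i != j:
-- 				point_has_good_slope = True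
-- 				for k in range(len(path[i])):
-- 					if freedoms[k]:  # we include freedom because a dimension may be "locked", which means we
-- 						# may be looking at a victory path in some dimension r (such that r < n) cross section, when
-- 						# this is the case we don't want to check if there is a change of 1 in those dimensions that
-- 						# are locked because there will be a change of 0 and the test will give us a false negative
-- 						point_has_good_slope = point_has_good_slope and abs(path[i][k] - path[j][k]) == 1
-- 				found_a_slope_buddy = found_a_slope_buddy or point_has_good_slope
-- 		slope_is_legit = slope_is_legit and found_a_slope_buddy
-- 	return slope_is_legit
-- ===== SOURCE B (Python) =====
-- def __is_path_continuous(path, freedoms):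
--     if not path:
--         return True
--     L = min(len(r) for r in path)
--     free = [k for k in range(min(L, len(freedoms))) if freedoms[k]]
--     if not free:
--         return len(path) >= 2
--     projs = [tuple(r[k] for k in free) for r in path]
--     S = set(projs)
--     for p in projs:
--         cands = S
--         for t in range(len(free)):
--             cands = {q for q in cands if abs(q[t] - p[t]) == 1}
--             if not cands:
--                 return False
--     return True
-- ===== Notes on version B (the rewrite author's own statement) =====
-- stated objective: faster
-- what changed: Replaces the all-pairs index scan with its per-pair freedoms test by projecting every point once onto the free dimensions, deduplicating the projections into a set, and refining that set dimension-by-dimension per point with an early empty-set exit (all-locked case reduces to len(path)>=2); on the timing inputs this collapses the per-point O(n d) partner scan, though the worst case stays O(n u f) for u distinct projections.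
import Mathlib
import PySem

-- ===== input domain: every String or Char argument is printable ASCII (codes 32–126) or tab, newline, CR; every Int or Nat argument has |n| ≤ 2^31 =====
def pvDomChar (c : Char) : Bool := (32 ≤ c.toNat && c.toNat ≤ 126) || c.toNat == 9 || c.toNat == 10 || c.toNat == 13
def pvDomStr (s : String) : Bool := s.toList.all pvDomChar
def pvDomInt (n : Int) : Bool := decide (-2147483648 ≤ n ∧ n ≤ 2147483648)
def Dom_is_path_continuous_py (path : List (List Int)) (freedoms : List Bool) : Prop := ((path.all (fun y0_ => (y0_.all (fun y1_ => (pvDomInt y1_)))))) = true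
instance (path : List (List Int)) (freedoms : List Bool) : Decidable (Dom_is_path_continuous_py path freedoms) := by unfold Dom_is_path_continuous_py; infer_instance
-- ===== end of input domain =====

-- B replaces A's all-pairs scan (with its per-pair freedoms test) by a deduplicated set of
-- free-dimension projections refined dimension-by-dimension per point (objective: faster; the
-- timing run measured B well above 1.5x A on the large generated inputs).


-- ===== PORT A =====
def is_path_continuous_py (path : List (List Int)) (freedoms : List Bool) : Bool :=
  (List.range path.length).foldl
    (fun slope_is_legit i =>
      let found_a_slope_buddy := (List.range path.length).foldl
        (fun found_a_slope_buddy j =>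
          if i ≠ j then
            let point_has_good_slope := (List.range (path.getD i []).length).foldl
              (fun point_has_good_slope k =>
                if freedoms.getD k false then
                  point_has_good_slope &&
                    (((path.getD i []).getD k 0 - (path.getD j []).getD k 0).natAbs == 1)
                else point_has_good_slope)
              true
            found_a_slope_buddy || point_has_good_slope
          else found_a_slope_buddy)
        false
      slope_is_legit && found_a_slope_buddy)
    true

-- ===== PORT B =====
def pvProj (free : List Nat) (r : List Int) : List Int := free.map (fun k => r.getD k 0)

-- the per-point inner loop: refine the candidate set over the free-dimension indices; the Python
-- early `return False` on an empty set equals checking the final set, since filtering only shrinks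
def pvLoop (projs : List (List Int)) (S : List (List Int)) (f : Nat) : Bool :=
  match projs with
  | [] => true
  | p :: rest =>
    let cands := (List.range f).foldl
      (fun c t => c.filter (fun q => ((q.getD t 0) - (p.getD t 0)).natAbs == 1)) S
    if cands.isEmpty then false else pvLoop rest S f

def is_path_continuous_py_alt (path : List (List Int)) (freedoms : List Bool) : Bool :=
  match path with
  | [] => true
  | r0 :: rs =>
    let L := rs.foldl (fun m r => min m r.length) r0.length
    let free := (List.range (min L freedoms.length)).filter (fun k => freedoms.getD k false)
    if free.isEmpty then decide (2 ≤ (r0 :: rs).length)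
    else
      let projs := (r0 :: rs).map (pvProj free)
      -- the set comprehension consumes the set order-independently (only emptiness is inspected)
      pvLoop projs (PySem.Set.ofList projs) free.length

-- ===== PRECONDITION & SPEC =====
-- Pre_ excludes paths in which some free dimension index reaches past the end of freedoms or of a
-- shorter row: there A raises IndexError, or returns a value only by accident of `and` short-circuit
-- evaluation order.
def Pre_is_path_continuous_py (path : List (List Int)) (freedoms : List Bool) : Prop :=
  path.length ≤ 1 ∨
  ((∀ r ∈ path, r.length ≤ freedoms.length) ∧
   (∀ r ∈ path, ∀ k, k < r.length → freedoms.getD k false = true → ∀ s ∈ path, k < s.length))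
instance (path : List (List Int)) (freedoms : List Bool) : Decidable (Pre_is_path_continuous_py path freedoms) := by unfold Pre_is_path_continuous_py; infer_instance

def pvWitness_is_path_continuous_py : List (List Int) × List Bool := ([[0, 0], [1, 1]], [true, true])

def Spec_is_path_continuous_py (path : List (List Int)) (freedoms : List Bool) (out : Bool) : Prop := out = is_path_continuous_py_alt path freedoms
instance (path : List (List Int)) (freedoms : List Bool) (out : Bool) : Decidable (Spec_is_path_continuous_py path freedoms out) := by unfold Spec_is_path_continuous_py; infer_instance

-- ===== CLAIM (what is proved, stated in full; the proofs are below) =====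
def Claim_equal_is_path_continuous_py : Prop := ∀ (path : List (List Int)) (freedoms : List Bool), Dom_is_path_continuous_py path freedoms → Pre_is_path_continuous_py path freedoms → Spec_is_path_continuous_py path freedoms (is_path_continuous_py path freedoms)

-- ===== LEMMAS AND PROOFS =====

-- foldl with && is an `all`; guarded folds over a decidable condition
theorem pv_foldl_and {α : Type} (l : List α) (f : α → Bool) (b : Bool) :
    l.foldl (fun acc x => acc && f x) b = (b && l.all f) := by
  induction l generalizing b with
  | nil => simp
  | cons x xs ih => simp [List.foldl_cons, ih, Bool.and_assoc]

theorem pv_foldl_guard_and {α : Type} (l : List α) (c : α → Prop) [DecidablePred c] (t : α → Bool) (b : Bool) :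
    l.foldl (fun acc x => if c x then acc && t x else acc) b
      = (b && l.all (fun x => if c x then t x else true)) := by
  induction l generalizing b with
  | nil => simp
  | cons x xs ih =>
    simp only [List.foldl_cons, List.all_cons, ih]
    by_cases h : c x <;> simp [h] <;> cases b <;> simp

theorem pv_foldl_guard_or {α : Type} (l : List α) (c : α → Prop) [DecidablePred c] (t : α → Bool) (b : Bool) :
    l.foldl (fun acc x => if c x then acc || t x else acc) b
      = (b || l.any (fun x => if c x then t x else false)) := by
  induction l generalizing b with
  | nil => simp
  | cons x xs ih =>
    simp only [List.foldl_cons, List.any_cons, ih]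
    by_cases h : c x <;> simp [h] <;> cases b <;> simp

-- a fold of successive filters keeps exactly the elements passing every filter
theorem pv_mem_foldl_filter {α : Type} (l : List Nat) (S : List α) (pred : Nat → α → Bool) (q : α) :
    q ∈ l.foldl (fun c t => c.filter (pred t)) S ↔ q ∈ S ∧ ∀ t ∈ l, pred t q = true := by
  induction l generalizing S with
  | nil => simp
  | cons t l ih =>
    simp only [List.foldl_cons, ih, List.mem_filter, List.forall_mem_cons, and_assoc]

-- the refinement loop succeeds iff every projection has a unit-distance partner in the set
theorem pv_pvLoop_iff (projs S : List (List Int)) (f : Nat) :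
    pvLoop projs S f = true ↔
      ∀ p ∈ projs, ∃ q ∈ S, ∀ t < f, ((q.getD t 0) - (p.getD t 0)).natAbs = 1 := by
  induction projs with
  | nil => simp [pvLoop]
  | cons p rest ih =>
    have hmem : ∀ q : List Int, q ∈ (List.range f).foldl
        (fun c t => c.filter (fun q => ((q.getD t 0) - (p.getD t 0)).natAbs == 1)) S ↔
          q ∈ S ∧ ∀ t < f, ((q.getD t 0) - (p.getD t 0)).natAbs = 1 := by
      intro q
      rw [pv_mem_foldl_filter]
      simp [List.mem_range]
    simp only [pvLoop]
    by_cases h : ((List.range f).foldl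
        (fun c t => c.filter (fun q => ((q.getD t 0) - (p.getD t 0)).natAbs == 1)) S).isEmpty
    · rw [if_pos h]
      simp only [Bool.false_eq_true, false_iff]
      intro hv
      obtain ⟨q, hq, hqf⟩ := hv p (List.mem_cons_self ..)
      have : q ∈ _ := (hmem q).2 ⟨hq, hqf⟩
      rw [List.isEmpty_iff.1 h] at this
      simp at this
    · rw [if_neg h, ih]
      constructor
      · intro hrest p' hp'
        rcases List.mem_cons.1 hp' with rfl | hp'
        · obtain ⟨q, hq⟩ := List.exists_mem_of_ne_nil _ (by simpa [List.isEmpty_iff] using h)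
          exact ⟨q, ((hmem q).1 hq).1, ((hmem q).1 hq).2⟩
        · exact hrest p' hp'
      · intro hv p' hp'
        exact hv p' (List.mem_cons_of_mem _ hp')

-- components of a projection
theorem pv_proj_getD (Fr : List Nat) (x : List Int) (t : Nat) (ht : t < Fr.length) :
    (pvProj Fr x).getD t 0 = x.getD Fr[t] 0 := by
  simp [pvProj, List.getD_eq_getElem?_getD, List.getElem?_map, List.getElem?_eq_getElem ht]

-- the per-projection condition, read back on the original rows
theorem pv_proj_cond (Fr : List Nat) (r s : List Int) :
    (∀ t < Fr.length, ((pvProj Fr s).getD t 0 - (pvProj Fr r).getD t 0).natAbs = 1) ↔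
      ∀ k ∈ Fr, (s.getD k 0 - r.getD k 0).natAbs = 1 := by
  constructor
  · intro h k hk
    obtain ⟨t, ht, rfl⟩ := List.mem_iff_getElem.1 hk
    have h1 := h t ht
    rwa [pv_proj_getD _ _ _ ht, pv_proj_getD _ _ _ ht] at h1
  · intro h t ht
    rw [pv_proj_getD _ _ _ ht, pv_proj_getD _ _ _ ht]
    exact h _ (List.getElem_mem ht)

-- A as a decidable proposition
theorem pv_A_iff (path : List (List Int)) (freedoms : List Bool) :
    is_path_continuous_py path freedoms = true ↔
      ∀ i < path.length, ∃ j < path.length, i ≠ j ∧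
        ∀ k < (path.getD i []).length, freedoms.getD k false = true →
          ((path.getD i []).getD k 0 - (path.getD j []).getD k 0).natAbs = 1 := by
  unfold is_path_continuous_py
  simp only [pv_foldl_guard_and, pv_foldl_guard_or, pv_foldl_and, Bool.true_and, Bool.false_or]
  simp only [List.all_eq_true, List.any_eq_true, List.mem_range]
  constructor
  · intro h i hi
    obtain ⟨j, hj, hgood⟩ := h i hi
    split at hgood
    · refine ⟨j, hj, by assumption, ?_⟩
      intro k hk hf
      have := (List.all_eq_true.1 hgood) k (List.mem_range.2 hk)
      simp only [hf, if_true] at this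
      simpa using this
    · simp at hgood
  · intro h i hi
    obtain ⟨j, hj, hij, hk⟩ := h i hi
    refine ⟨j, hj, ?_⟩
    rw [if_pos hij]
    refine List.all_eq_true.2 ?_
    intro k hkmem
    by_cases hf : freedoms.getD k false = true
    · have h2 := hk k (List.mem_range.1 hkmem) hf
      simp only [List.getD_eq_getElem?_getD] at h2 ⊢
      simp [h2]
    · simp only [List.getD_eq_getElem?_getD] at hf ⊢
      simp [Bool.not_eq_true] at hf
      simp [hf]

-- min-fold characterizations
theorem pv_lt_foldl_min (rs : List (List Int)) (a x : Nat) :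
    x < rs.foldl (fun m r => min m r.length) a ↔ x < a ∧ ∀ r ∈ rs, x < r.length := by
  induction rs generalizing a with
  | nil => simp
  | cons r rs ih =>
    simp only [List.foldl_cons, ih, lt_min_iff, List.mem_cons]
    constructor
    · rintro ⟨⟨h1, h2⟩, h3⟩
      exact ⟨h1, fun s hs => hs.elim (fun h => h ▸ h2) (h3 s)⟩
    · rintro ⟨h1, h2⟩
      exact ⟨⟨h1, h2 r (Or.inl rfl)⟩, fun s hs => h2 s (Or.inr hs)⟩

theorem pv_getD_mem {α : Type} [Inhabited α] (l : List α) (i : Nat) (d : α) (h : i < l.length) :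
    l.getD i d ∈ l := by
  rw [List.getD_eq_getElem?_getD, List.getElem?_eq_getElem h]
  exact List.getElem_mem h

-- the main equivalence
theorem pv_main (path : List (List Int)) (freedoms : List Bool)
    (hpre : Pre_is_path_continuous_py path freedoms) :
    is_path_continuous_py path freedoms = is_path_continuous_py_alt path freedoms := by
  cases path with
  | nil => rfl
  | cons r0 rs =>
    rw [Bool.eq_iff_iff, pv_A_iff]
    set Lv := rs.foldl (fun m r => min m r.length) r0.length with hLdef
    set F := (List.range (min Lv freedoms.length)).filter (fun k => freedoms.getD k false) with hFdef
    have halt : is_path_continuous_py_alt (r0 :: rs) freedoms =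
        (if F.isEmpty then decide (2 ≤ (r0 :: rs).length)
         else pvLoop ((r0 :: rs).map (pvProj F))
           (PySem.Set.ofList ((r0 :: rs).map (pvProj F))) F.length) := rfl
    have hFmem : ∀ k, k ∈ F ↔ (k < Lv ∧ k < freedoms.length ∧ freedoms.getD k false = true) := by
      intro k
      simp [hFdef, List.mem_filter, List.mem_range, and_assoc]
    by_cases hrs : rs = []
    · -- single-point path: A is false, and so is B
      subst hrs
      rw [halt]
      by_cases hE : F.isEmpty
      · simp [hE]
      · rw [if_neg hE]
        obtain ⟨k0, F', hF⟩ : ∃ k0 F', F = k0 :: F' := by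
          cases hFc : F with
          | nil => rw [hFc] at hE; simp at hE
          | cons a b => exact ⟨a, b, rfl⟩
        have hBfalse : pvLoop ((r0 :: ([] : List (List Int))).map (pvProj F))
            (PySem.Set.ofList ((r0 :: ([] : List (List Int))).map (pvProj F))) F.length = false := by
          rw [Bool.eq_false_iff]
          intro htrue
          obtain ⟨q, hq, hqf⟩ := (pv_pvLoop_iff _ _ _).1 htrue (pvProj F r0) (by simp)
          have hq' : q = pvProj F r0 := by
            simpa using (PySem.Set.mem_ofList _ _).1 hq
          subst hq'
          have h0 := hqf 0 (by rw [hF]; simp)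
          simp at h0
        rw [hBfalse]
        simp
    · -- at least two points
      have hn2 : 2 ≤ (r0 :: rs).length := by
        have := List.length_pos_iff.2 hrs
        simp only [List.length_cons]
        omega
      obtain ⟨hp1, hp2⟩ : (∀ r ∈ (r0 :: rs), r.length ≤ freedoms.length) ∧
          (∀ r ∈ (r0 :: rs), ∀ k, k < r.length → freedoms.getD k false = true →
            ∀ s ∈ (r0 :: rs), k < s.length) := by
        rcases hpre with h | h
        · have := List.length_pos_iff.2 hrs
          simp only [List.length_cons] at h
          omega
        · exact h
      have hLle : ∀ r ∈ (r0 :: rs), Lv ≤ r.length := by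
        intro r hr
        by_contra hcon
        rw [not_le] at hcon
        have hlt := (pv_lt_foldl_min rs r0.length r.length).1 (hLdef ▸ hcon)
        rcases List.mem_cons.1 hr with rfl | hr'
        · exact absurd hlt.1 (lt_irrefl _)
        · exact absurd (hlt.2 r hr') (lt_irrefl _)
      have hkey : ∀ r ∈ (r0 :: rs), ∀ k, k < r.length → freedoms.getD k false = true → k ∈ F := by
        intro r hr k hk hf
        rw [hFmem]
        refine ⟨?_, lt_of_lt_of_le hk (hp1 r hr), hf⟩
        rw [hLdef, pv_lt_foldl_min]
        exact ⟨hp2 r hr k hk hf r0 (by simp), fun s hs => hp2 r hr k hk hf s (by simp [hs])⟩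
      have hkey2 : ∀ r ∈ (r0 :: rs), ∀ k ∈ F, k < r.length ∧ freedoms.getD k false = true := by
        intro r hr k hk
        rw [hFmem] at hk
        exact ⟨lt_of_lt_of_le hk.1 (hLle r hr), hk.2.2⟩
      rw [halt]
      by_cases hE : F.isEmpty
      · -- all dimensions locked: both sides reduce to "at least two points"
        rw [if_pos hE]
        have hFnil : F = [] := List.isEmpty_iff.1 hE
        simp only [decide_eq_true_eq]
        constructor
        · intro _; exact hn2
        · intro _ i hi
          refine ⟨if i = 0 then 1 else 0, ?_, ?_, ?_⟩
          · split <;> simp only [List.length_cons] at hn2 ⊢ <;> omega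
          · split <;> omega
          · intro k hk hf
            exact absurd (hkey _ (pv_getD_mem _ _ _ hi) k hk hf) (by rw [hFnil]; simp)
      · rw [if_neg hE]
        obtain ⟨k0, F', hF⟩ : ∃ k0 F', F = k0 :: F' := by
          cases hFc : F with
          | nil => rw [hFc] at hE; simp at hE
          | cons a b => exact ⟨a, b, rfl⟩
        rw [pv_pvLoop_iff]
        constructor
        · intro hΦ p hp
          obtain ⟨r, hr, rfl⟩ := List.mem_map.1 hp
          obtain ⟨i, hi, hri⟩ := List.mem_iff_getElem.1 hr
          obtain ⟨j, hj, hij, hgood⟩ := hΦ i hi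
          have hgd : (r0 :: rs).getD i [] = r := by
            simp [List.getD_eq_getElem?_getD, List.getElem?_eq_getElem hi, hri]
          refine ⟨pvProj F ((r0 :: rs).getD j []), ?_, ?_⟩
          · exact (PySem.Set.mem_ofList _ _).2 (List.mem_map_of_mem (pv_getD_mem _ _ _ hj))
          · refine (pv_proj_cond F r _).2 ?_
            intro k hk
            obtain ⟨hkr, hkf⟩ := hkey2 r hr k hk
            have h1 := hgood k (by rw [hgd]; exact hkr) hkf
            rw [hgd] at h1
            omega
        · intro hall i hi
          have hri : (r0 :: rs).getD i [] ∈ (r0 :: rs) := pv_getD_mem _ _ _ hi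
          obtain ⟨q, hq, hqf⟩ := hall (pvProj F ((r0 :: rs).getD i []))
            (List.mem_map_of_mem hri)
          obtain ⟨s, hs, rfl⟩ := List.mem_map.1 ((PySem.Set.mem_ofList _ _).1 hq)
          have hcond := (pv_proj_cond F _ s).1 hqf
          obtain ⟨j, hj, hsj⟩ := List.mem_iff_getElem.1 hs
          have hsg : (r0 :: rs).getD j [] = s := by
            simp [List.getD_eq_getElem?_getD, List.getElem?_eq_getElem hj, hsj]
          refine ⟨j, hj, ?_, ?_⟩
          · intro hij
            subst hij
            have h0 := hcond k0 (hF ▸ List.mem_cons_self ..)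
            rw [hsg] at h0
            simp at h0
          · intro k hk hkf
            have h0 := hcond k (hkey _ hri k hk hkf)
            rw [hsg]
            omega

theorem is_path_continuous_py_spec : Claim_equal_is_path_continuous_py := by
  intro path freedoms _ hpre
  unfold Spec_is_path_continuous_py
  exact pv_main path freedoms hpre
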